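-- pv_equiv track=rewrite | github.com/OhadElgamil/zero-training-controlable-recommendation-Large-Language-Model | tools/eval_hit1_item.py | remove_padding
-- ===== SOURCE A (Python) =====
-- def remove_padding(seq_pairs, pad_id: int, pad_rating: int = 0):
--     x = list(seq_pairs)
--     for _ in range(10):
--         try:
--             x.remove((pad_id, pad_rating))
--         except ValueError:
--             break
--     return x
-- ===== SOURCE B (Python) =====
-- def remove_padding(seq_pairs, pad_id: int, pad_rating: int = 0):
--     pad = (pad_id, pad_rating)
--     res = []
--     dropped = 0
--     for e in list(seq_pairs):
--         if e == pad and dropped < 10: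
--             dropped += 1
--         else:
--             res.append(e)
--     return res
-- ===== Notes on version B (the rewrite author's own statement) =====
-- stated objective: simpler
-- what changed: Replaced the up-to-10 repeated list.remove rescans with a single left-to-right pass that skips the first 10 pad pairs using a counter.
import Mathlib
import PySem

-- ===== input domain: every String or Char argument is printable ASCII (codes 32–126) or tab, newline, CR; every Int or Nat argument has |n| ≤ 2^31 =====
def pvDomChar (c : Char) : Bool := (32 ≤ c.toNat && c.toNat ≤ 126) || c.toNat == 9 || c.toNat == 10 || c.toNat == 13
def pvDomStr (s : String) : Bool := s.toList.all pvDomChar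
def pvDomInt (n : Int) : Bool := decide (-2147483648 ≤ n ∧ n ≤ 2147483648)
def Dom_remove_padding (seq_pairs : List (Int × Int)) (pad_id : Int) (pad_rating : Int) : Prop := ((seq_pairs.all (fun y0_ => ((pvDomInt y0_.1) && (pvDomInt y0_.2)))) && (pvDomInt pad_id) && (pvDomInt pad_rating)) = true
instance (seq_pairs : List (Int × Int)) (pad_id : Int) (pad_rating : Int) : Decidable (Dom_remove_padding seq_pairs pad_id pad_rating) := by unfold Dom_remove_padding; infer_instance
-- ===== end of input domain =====

-- B replaces A's up-to-10 repeated list.remove rescans with one left-to-right pass and a drop counter (simpler).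

-- ===== PORT A =====
-- the 'for _ in range(10)' loop: each iteration removes the first occurrence, break on ValueError (remove? = none)
def removePaddingLoop : Nat → List (Int × Int) → (Int × Int) → List (Int × Int)
  | 0, x, _ => x
  | n + 1, x, p =>
    match PySem.List.remove? x p with
    | some x' => removePaddingLoop n x' p
    | none => x

def remove_padding (seq_pairs : List (Int × Int)) (pad_id : Int) (pad_rating : Int) : List (Int × Int) :=
  removePaddingLoop 10 seq_pairs (pad_id, pad_rating)

-- ===== PORT B =====
-- Source B's single pass: state = (res, dropped); skip pad pairs while dropped < 10, else append
def remove_padding_alt (seq_pairs : List (Int × Int)) (pad_id : Int) (pad_rating : Int) : List (Int × Int) :=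
  let pad : Int × Int := (pad_id, pad_rating)
  (seq_pairs.foldl
    (fun (st : List (Int × Int) × Nat) e =>
      if e = pad ∧ st.2 < 10 then (st.1, st.2 + 1) else (st.1 ++ [e], st.2))
    ([], 0)).1

-- ===== PRECONDITION & SPEC =====
def Spec_remove_padding (seq_pairs : List (Int × Int)) (pad_id : Int) (pad_rating : Int) (out : List (Int × Int)) : Prop := out = remove_padding_alt seq_pairs pad_id pad_rating
instance (seq_pairs : List (Int × Int)) (pad_id : Int) (pad_rating : Int) (out : List (Int × Int)) : Decidable (Spec_remove_padding seq_pairs pad_id pad_rating out) := by unfold Spec_remove_padding; infer_instance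

-- ===== CLAIM (what is proved, stated in full; the proofs are below) =====
def Claim_equal_remove_padding : Prop := ∀ (seq_pairs : List (Int × Int)) (pad_id : Int) (pad_rating : Int), Dom_remove_padding seq_pairs pad_id pad_rating → Spec_remove_padding seq_pairs pad_id pad_rating (remove_padding seq_pairs pad_id pad_rating)

-- ===== LEMMAS AND PROOFS =====

-- reference function: drop the first n occurrences of p in one pass
def padSkip (p : Int × Int) : Nat → List (Int × Int) → List (Int × Int)
  | _, [] => []
  | n, e :: t => if e = p ∧ 0 < n then padSkip p (n - 1) t else e :: padSkip p n t

theorem padSkip_zero (p : Int × Int) (l : List (Int × Int)) : padSkip p 0 l = l := by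
  induction l with
  | nil => rfl
  | cons e t ih => simp [padSkip, ih]

theorem padSkip_of_not_mem (p : Int × Int) (n : Nat) (l : List (Int × Int)) (h : p ∉ l) :
    padSkip p n l = l := by
  induction l with
  | nil => rfl
  | cons e t ih =>
    simp only [List.mem_cons, not_or] at h
    have he : ¬ (e = p ∧ 0 < n) := fun hc => h.1 hc.1.symm
    simp [padSkip, he, ih h.2]

theorem padSkip_remove (p : Int × Int) (n : Nat) (l l' : List (Int × Int))
    (h : PySem.List.remove? l p = some l') : padSkip p (n + 1) l = padSkip p n l' := by
  induction l generalizing l' with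
  | nil => simp [PySem.List.remove?] at h
  | cons e t ih =>
    by_cases he : e = p
    · subst he
      rw [PySem.List.remove?_cons_self] at h
      cases h
      simp [padSkip]
    · rw [PySem.List.remove?_cons_of_ne t he] at h
      cases ht : PySem.List.remove? t p with
      | none => simp [ht] at h
      | some t' =>
        simp only [ht, Option.map_some] at h
        cases h
        simp [padSkip, he, ih t' ht]

theorem loop_eq_padSkip (p : Int × Int) (n : Nat) (l : List (Int × Int)) :
    removePaddingLoop n l p = padSkip p n l := by
  induction n generalizing l with
  | zero => simp [removePaddingLoop, padSkip_zero]
  | succ n ih =>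
    cases h : PySem.List.remove? l p with
    | none =>
      rw [removePaddingLoop]
      simp only [h]
      exact (padSkip_of_not_mem p (n + 1) l ((PySem.List.remove?_eq_none_iff l p).mp h)).symm
    | some x' =>
      rw [removePaddingLoop]
      simp only [h]
      rw [ih x', padSkip_remove p n l x' h]

theorem foldl_eq_padSkip (p : Int × Int) (l : List (Int × Int)) :
    ∀ (acc : List (Int × Int)) (d : Nat), d ≤ 10 →
    (l.foldl
      (fun (st : List (Int × Int) × Nat) e =>
        if e = p ∧ st.2 < 10 then (st.1, st.2 + 1) else (st.1 ++ [e], st.2))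
      (acc, d)).1 = acc ++ padSkip p (10 - d) l := by
  induction l with
  | nil => intro acc d _; simp [padSkip]
  | cons e t ih =>
    intro acc d hd
    by_cases hc : e = p ∧ d < 10
    · have h10 : 0 < 10 - d := by omega
      have hc2 : e = p ∧ 0 < 10 - d := ⟨hc.1, h10⟩
      have hstep : 10 - d - 1 = 10 - (d + 1) := by omega
      simp only [List.foldl_cons, if_pos hc, padSkip, if_pos hc2, hstep]
      exact ih acc (d + 1) (by omega)
    · have hc' : ¬ (e = p ∧ 0 < 10 - d) := by
        intro ⟨h1, h2⟩; exact hc ⟨h1, by omega⟩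
      simp only [List.foldl_cons, if_neg hc, padSkip, if_neg hc']
      rw [ih (acc ++ [e]) d hd, List.append_assoc]
      rfl

-- ===== VERDICT (by name: the statement is the Claim_ definition above) =====
theorem remove_padding_spec : Claim_equal_remove_padding := by
  intro seq_pairs pad_id pad_rating _
  unfold Spec_remove_padding remove_padding remove_padding_alt
  rw [loop_eq_padSkip, foldl_eq_padSkip (pad_id, pad_rating) seq_pairs [] 0 (by omega)]
  rfl
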